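-- pv_equiv track=rewrite | github.com/inwikipedia/md_to_docx_clean | md_to_docx_clean.py | ensure_blank_lines_around_display_math
-- ===== SOURCE A (Python) =====
-- def ensure_blank_lines_around_display_math(text: str) -> str:
--     """
--     保证 $$ 块公式前后有空行，避免 Pandoc 在列表或段落里误判。
--     """
--     lines = text.split("\n")
--     out = []
--
--     i = 0
--     while i < len(lines):
--         line = lines[i]
--         stripped = line.strip()
--
--         if stripped == "$$":
--             if out and out[-1].strip() != "":
--                 out.append("")
--
--             out.append(line)
--             i += 1
--
--             while i < len(lines):
--                 out.append(lines[i])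
--                 if lines[i].strip() == "$$":
--                     break
--                 i += 1
--
--             if i + 1 < len(lines) and lines[i + 1].strip() != "":
--                 out.append("")
--             i += 1
--             continue
--
--         out.append(line)
--         i += 1
--
--     return "\n".join(out)
-- ===== SOURCE B (Python) =====
-- def ensure_blank_lines_around_display_math(text: str) -> str:
--     out = []
--     in_math = False
--     just_closed = False
--     for line in text.split("\n"):
--         if in_math:
--             out.append(line)
--             if line.strip() == "$$":
--                 in_math = False
--                 just_closed = True
--             continue
--         if just_closed:
--             if line.strip() != "":
--                 out.append("")
--             just_closed = False
--         if line.strip() == "$$":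
--             if out and out[-1].strip() != "":
--                 out.append("")
--             out.append(line)
--             in_math = True
--         else:
--             out.append(line)
--     return "\n".join(out)
-- ===== Notes on version B (the rewrite author's own statement) =====
-- stated objective: simpler
-- what changed: Replaced A's index-driven outer loop with a nested inner fence-consuming loop and a one-line lookahead by a single flat pass over the lines using an in_math/just_closed state machine that defers the trailing blank line to the next iteration.
import Mathlib
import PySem

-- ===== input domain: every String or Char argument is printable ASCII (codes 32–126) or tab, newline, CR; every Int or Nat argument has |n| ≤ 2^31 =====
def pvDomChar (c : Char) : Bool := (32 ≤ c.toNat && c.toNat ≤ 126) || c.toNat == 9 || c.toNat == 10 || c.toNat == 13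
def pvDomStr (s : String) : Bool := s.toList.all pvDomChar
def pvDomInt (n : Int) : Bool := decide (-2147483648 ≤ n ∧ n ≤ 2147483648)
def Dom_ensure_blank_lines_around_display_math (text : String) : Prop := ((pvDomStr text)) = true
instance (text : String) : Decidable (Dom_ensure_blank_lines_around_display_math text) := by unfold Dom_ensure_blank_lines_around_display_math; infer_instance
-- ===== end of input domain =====

-- B replaces A's nested inner loop and one-line lookahead by a single flat pass with
-- an `in_math`/`just_closed` state machine (objective: alternative decomposition, same O(n) cost).

-- ===== PORT A =====
-- A's inner `while` loop: append lines until (and including) a closing "$$" line;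
-- returns the grown output and the lines remaining AFTER the closing fence.
def pvInnerA (out : List String) (rest : List String) : List String × List String :=
  match rest with
  | [] => (out, [])
  | l :: r =>
    if PySem.Str.strip l == "$$" then (out ++ [l], r) else pvInnerA (out ++ [l]) r

theorem pvInnerA_len (rest : List String) (out : List String) :
    (pvInnerA out rest).2.length ≤ rest.length := by
  induction rest generalizing out with
  | nil => simp [pvInnerA]
  | cons l r ih =>
    simp only [pvInnerA]
    split
    · simp
    · exact le_trans (ih _) (by simp)

-- A's outer `while i < len(lines)` loop, as recursion on the remaining lines.
def pvLoopA (out : List String) (rest : List String) : List String :=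
  match rest with
  | [] => out
  | line :: rest' =>
    if PySem.Str.strip line == "$$" then
      -- `if out and out[-1].strip() != "": out.append("")`
      let out1 := match out.getLast? with
        | some lst => if PySem.Str.strip lst ≠ "" then out ++ [""] else out
        | none => out
      let p := pvInnerA (out1 ++ [line]) rest'
      -- `if i + 1 < len(lines) and lines[i+1].strip() != "": out.append("")`
      let o2 := match p.2 with
        | h :: _ => if PySem.Str.strip h ≠ "" then p.1 ++ [""] else p.1
        | [] => p.1
      pvLoopA o2 p.2
    else pvLoopA (out ++ [line]) rest'
termination_by rest.length
decreasing_by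
  · exact Nat.lt_succ_of_le (pvInnerA_len rest' _)
  · simp

def ensure_blank_lines_around_display_math (text : String) : String :=
  PySem.Str.join "\n" (pvLoopA [] ((PySem.Str.split? text "\n").getD []))

-- ===== PORT B =====
-- B's single `for line in lines` loop with state (in_math, just_closed, out).
def pvLoopB (inMath : Bool) (justClosed : Bool) (out : List String)
    (rest : List String) : List String :=
  match rest with
  | [] => out
  | line :: r =>
    if inMath then
      if PySem.Str.strip line == "$$" then pvLoopB false true (out ++ [line]) r
      else pvLoopB true justClosed (out ++ [line]) r
    else
      let out1 := if justClosed then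
          (if PySem.Str.strip line ≠ "" then out ++ [""] else out)
        else out
      if PySem.Str.strip line == "$$" then
        let out2 := match out1.getLast? with
          | some lst => if PySem.Str.strip lst ≠ "" then out1 ++ [""] else out1
          | none => out1
        pvLoopB true false (out2 ++ [line]) r
      else pvLoopB false false (out1 ++ [line]) r

def ensure_blank_lines_around_display_math_alt (text : String) : String :=
  PySem.Str.join "\n" (pvLoopB false false [] ((PySem.Str.split? text "\n").getD []))

-- ===== PRECONDITION & SPEC =====
def Spec_ensure_blank_lines_around_display_math (text : String) (out : String) : Prop := out = ensure_blank_lines_around_display_math_alt text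
instance (text : String) (out : String) : Decidable (Spec_ensure_blank_lines_around_display_math text out) := by unfold Spec_ensure_blank_lines_around_display_math; infer_instance

-- ===== CLAIM (what is proved, stated in full; the proofs are below) =====
def Claim_equal_ensure_blank_lines_around_display_math : Prop := ∀ (text : String), Dom_ensure_blank_lines_around_display_math text → Spec_ensure_blank_lines_around_display_math text (ensure_blank_lines_around_display_math text)

-- ===== LEMMAS AND PROOFS =====

-- While in math mode, B appends lines exactly as A's inner loop does,
-- and leaves math mode with `just_closed` set, at A's inner loop's exit point.
theorem pvLoopB_inMath (rest : List String) (out : List String) :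
    pvLoopB true false out rest
      = pvLoopB false true (pvInnerA out rest).1 (pvInnerA out rest).2 := by
  induction rest generalizing out with
  | nil => simp [pvLoopB, pvInnerA]
  | cons l r ih =>
    by_cases h : (PySem.Str.strip l == "$$") = true
    · simp [pvLoopB, pvInnerA, h]
    · rw [show pvInnerA out (l :: r) = pvInnerA (out ++ [l]) r by simp [pvInnerA, h]]
      rw [show pvLoopB true false out (l :: r) = pvLoopB true false (out ++ [l]) r by simp [pvLoopB, h]]
      exact ih (out ++ [l])

-- Resolving `just_closed` against the head of the remaining lines equals
-- A's eager lookahead insertion of a blank line.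
theorem pvLoopB_jc (rest : List String) (out : List String) :
    pvLoopB false true out rest
      = pvLoopB false false
          (match rest with
           | h :: _ => if PySem.Str.strip h ≠ "" then out ++ [""] else out
           | [] => out) rest := by
  cases rest with
  | nil => rfl
  | cons h r => simp [pvLoopB]

set_option maxHeartbeats 1000000 in
-- Main correspondence: A's indexed loop equals B's flat state machine.
theorem pvLoop_eq (n : Nat) (rest : List String) (out : List String)
    (hn : rest.length ≤ n) : pvLoopA out rest = pvLoopB false false out rest := by
  induction n generalizing rest out with
  | zero =>
    have h0 : rest = [] := List.eq_nil_of_length_eq_zero (Nat.le_zero.mp hn)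
    subst h0
    simp [pvLoopA, pvLoopB]
  | succ n ih =>
    cases rest with
    | nil => simp [pvLoopA, pvLoopB]
    | cons line r =>
      have hr : r.length ≤ n := Nat.lt_succ_iff.mp (by simpa using hn)
      by_cases h : (PySem.Str.strip line == "$$") = true
      · rw [pvLoopA.eq_def]
        simp only [pvLoopB, if_pos h, Bool.false_eq_true, if_false]
        rw [pvLoopB_inMath]
        cases hpp : (pvInnerA ((match out.getLast? with
            | some lst => if PySem.Str.strip lst ≠ "" then out ++ [""] else out
            | none => out) ++ [line]) r).2 with
        | nil => rw [pvLoopA.eq_def]; rfl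
        | cons hd tl =>
          have hlen : (hd :: tl).length ≤ n := by
            have := pvInnerA_len r ((match out.getLast? with
              | some lst => if PySem.Str.strip lst ≠ "" then out ++ [""] else out
              | none => out) ++ [line])
            rw [hpp] at this
            omega
          rw [pvLoopB_jc]
          exact ih _ _ hlen
      · rw [pvLoopA.eq_def]
        simp only [pvLoopB, if_neg h, Bool.false_eq_true, if_false]
        exact ih r _ hr

-- ===== VERDICT (by name: the statement is the Claim_ definition above) =====
theorem ensure_blank_lines_around_display_math_spec : Claim_equal_ensure_blank_lines_around_display_math := by
  intro text _
  unfold Spec_ensure_blank_lines_around_display_math ensure_blank_lines_around_display_math ensure_blank_lines_around_display_math_alt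
  rw [pvLoop_eq ((PySem.Str.split? text "\n").getD []).length _ _ le_rfl]
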